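-- pv_equiv track=rewrite | github.com/nianien/pikppo | src/video_remix/models/doubao/client.py | guess_audio_format
-- ===== SOURCE A (Python) =====
-- def guess_audio_format(url_or_path: str) -> str:
--     """从 URL 或路径猜测音频格式"""
--     lower = url_or_path.lower()
--     # 映射到 AudioFormat enum 支持的值
--     format_map = {
--         "mp3": "mp3",
--         "wav": "wav",
--         "m4a": "m4a",
--         "aac": "aac",
--         "ogg": "ogg",
--         "opus": "ogg",  # opus 通常封装在 ogg 容器中
--         "flac": "wav",  # flac 映射到 wav（如果 API 不支持 flac）
--     }
--     for ext, format_val in format_map.items():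
--         if lower.endswith("." + ext):
--             return format_val
--     # Default to wav if unknown（更稳定）
--     return "wav"
-- ===== SOURCE B (Python) =====
-- def guess_audio_format(url_or_path: str) -> str:
--     """从 URL 或路径猜测音频格式"""
--     format_map = {
--         "mp3": "mp3",
--         "wav": "wav",
--         "m4a": "m4a",
--         "aac": "aac",
--         "ogg": "ogg",
--         "opus": "ogg",
--         "flac": "wav",
--     }
--     lower = url_or_path.lower()
--     dot = lower.rfind(".")
--     ext = "" if dot < 0 else lower[dot + 1:]
--     return format_map.get(ext, "wav")
-- ===== Notes on version B (the rewrite author's own statement) =====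
-- stated objective: simpler
-- what changed: Instead of scanning the mapping and testing endswith('.'+ext) for each key, B parses the extension once (lowercase, rfind the last dot, take the substring after it) and does a single dict lookup with 'wav' as default.
import Mathlib
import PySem

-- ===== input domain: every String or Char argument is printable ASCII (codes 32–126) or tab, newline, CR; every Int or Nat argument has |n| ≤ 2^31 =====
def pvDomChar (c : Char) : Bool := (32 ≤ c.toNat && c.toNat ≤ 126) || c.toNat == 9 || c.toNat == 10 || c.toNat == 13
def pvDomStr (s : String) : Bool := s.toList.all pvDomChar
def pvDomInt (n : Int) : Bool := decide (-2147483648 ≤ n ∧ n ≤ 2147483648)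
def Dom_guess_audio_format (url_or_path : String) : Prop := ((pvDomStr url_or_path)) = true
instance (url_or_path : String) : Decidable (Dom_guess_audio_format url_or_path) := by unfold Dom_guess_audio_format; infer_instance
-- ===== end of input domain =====

-- B replaces A's per-key endswith scan by parsing the extension once (rfind of the last '.') and one dict lookup; objective: simpler.

-- ===== PORT A =====
-- the format_map dict, in insertion order (keys as char lists)
def pvFormatMap : List (List Char × String) :=
  [("mp3".toList, "mp3"), ("wav".toList, "wav"), ("m4a".toList, "m4a"),
   ("aac".toList, "aac"), ("ogg".toList, "ogg"), ("opus".toList, "ogg"),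
   ("flac".toList, "wav")]

-- the 'for ext, format_val in format_map.items(): if lower.endswith("." + ext): return format_val' loop
def pvALoop (lower : List Char) : List (List Char × String) → String
  | [] => "wav"
  | (ext, v) :: rest =>
      if PySem.Chars.endswith lower ('.' :: ext) then v else pvALoop lower rest

def guess_audio_format (url_or_path : String) : String :=
  pvALoop (PySem.Chars.lower url_or_path.toList) pvFormatMap

-- ===== PORT B =====
def guess_audio_format_alt (url_or_path : String) : String :=
  let lower := PySem.Chars.lower url_or_path.toList
  let dot := PySem.Chars.rfind lower ['.']
  let ext := if dot < 0 then ([] : List Char) else PySem.Chars.slice lower (some (dot + 1)) none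
  PySem.Dict.getD ⟨pvFormatMap⟩ ext "wav"

-- ===== PRECONDITION & SPEC =====
def Spec_guess_audio_format (url_or_path : String) (out : String) : Prop := out = guess_audio_format_alt url_or_path
instance (url_or_path : String) (out : String) : Decidable (Spec_guess_audio_format url_or_path out) := by unfold Spec_guess_audio_format; infer_instance

-- ===== CLAIM (what is proved, stated in full; the proofs are below) =====
def Claim_equal_guess_audio_format : Prop := ∀ (url_or_path : String), Dom_guess_audio_format url_or_path → Spec_guess_audio_format url_or_path (guess_audio_format url_or_path)

-- ===== LEMMAS AND PROOFS =====

theorem pv_singleton_prefix_drop (cs : List Char) (i : Nat) :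
    (['.'] : List Char).isPrefixOf (cs.drop i) = true ↔ cs[i]? = some '.' := by
  rw [List.isPrefixOf_iff_prefix]
  constructor
  · rintro ⟨t, ht⟩
    have : (cs.drop i)[0]? = some '.' := by rw [← ht]; rfl
    simpa using this
  · intro h
    have h0 : (cs.drop i)[0]? = some '.' := by simpa using h
    cases hd : cs.drop i with
    | nil => simp [hd] at h0
    | cons a t =>
      simp [hd] at h0
      exact ⟨t, by simp [h0]⟩
theorem pv_go_eq (cs : List Char) (n j : Nat) (hnj : n ≤ j)
    (hn : cs[n]? = some '.')
    (hafter : ∀ i, n < i → i ≤ j → cs[i]? ≠ some '.') :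
    PySem.Chars.rfind.go cs ['.'] j = (n : Int) := by
  induction j with
  | zero =>
    have hn0 : n = 0 := Nat.le_zero.mp hnj
    subst hn0
    have h0 : (['.'] : List Char).isPrefixOf (cs.drop 0) = true :=
      (pv_singleton_prefix_drop cs 0).mpr hn
    simp only [List.drop_zero] at h0
    simp [PySem.Chars.rfind.go, h0]
  | succ j ih =>
    rcases Nat.lt_or_ge n (j+1) with h | h
    · have hne : ¬ ((['.'] : List Char).isPrefixOf (cs.drop (j+1)) = true) := by
        rw [pv_singleton_prefix_drop]
        exact hafter (j+1) h (le_refl _)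
      simp only [PySem.Chars.rfind.go, if_neg hne]
      exact ih (Nat.lt_succ_iff.mp h) (fun i hi hij => hafter i hi (Nat.le_succ_of_le hij))
    · have hnn : n = j + 1 := le_antisymm hnj h
      subst hnn
      have h1 : (['.'] : List Char).isPrefixOf (cs.drop (j+1)) = true :=
        (pv_singleton_prefix_drop cs (j+1)).mpr hn
      simp only [PySem.Chars.rfind.go, if_pos h1]
theorem pv_rfind_last (pre k : List Char) (hk : '.' ∉ k) :
    PySem.Chars.rfind (pre ++ '.' :: k) ['.'] = (pre.length : Int) := by
  have hlen : (pre ++ '.' :: k).length = pre.length + k.length + 1 := by simp; omega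
  have hdot : (pre ++ '.' :: k)[pre.length]? = some '.' := by
    rw [List.getElem?_append_right (le_refl _)]
    simp
  refine pv_go_eq _ _ _ (by omega) hdot ?_
  intro i hi hile heq
  rcases Nat.lt_or_ge i (pre ++ '.' :: k).length with hlt | hge
  · have : (pre ++ '.' :: k)[i]? = k[i - pre.length - 1]? := by
      rw [List.getElem?_append_right (by omega)]
      rw [show i - pre.length = (i - pre.length - 1) + 1 by omega]
      simp
    rw [this] at heq
    exact hk (by
      have := List.getElem?_eq_some_iff.mp heq
      rcases this with ⟨hlt2, hval⟩
      exact hval ▸ List.getElem_mem _)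
  · rw [List.getElem?_eq_none hge] at heq
    simp at heq
theorem pv_go_mem (cs : List Char) (j : Nat) (h : 0 ≤ PySem.Chars.rfind.go cs ['.'] j) :
    cs[(PySem.Chars.rfind.go cs ['.'] j).toNat]? = some '.' := by
  induction j with
  | zero =>
    by_cases hp : (['.'] : List Char).isPrefixOf cs = true
    · simp only [PySem.Chars.rfind.go]
      rw [if_pos hp]
      simpa using (pv_singleton_prefix_drop cs 0).mp (by simpa using hp)
    · simp only [PySem.Chars.rfind.go] at h
      rw [if_neg hp] at h
      omega
  | succ j ih =>
    by_cases hp : (['.'] : List Char).isPrefixOf (cs.drop (j+1)) = true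
    · simp only [PySem.Chars.rfind.go]
      rw [if_pos hp]
      simpa using (pv_singleton_prefix_drop cs (j+1)).mp hp
    · simp only [PySem.Chars.rfind.go] at h ⊢
      rw [if_neg hp] at h ⊢
      exact ih h

theorem pv_rfind_spec (cs : List Char) (h : 0 ≤ PySem.Chars.rfind cs ['.']) :
    cs[(PySem.Chars.rfind cs ['.']).toNat]? = some '.' :=
  pv_go_mem cs cs.length h

theorem pv_endswith_iff (cs k : List Char) (hk : '.' ∉ k) :
    PySem.Chars.endswith cs ('.' :: k) = true ↔
      0 ≤ PySem.Chars.rfind cs ['.'] ∧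
        cs.drop (PySem.Chars.rfind cs ['.'] + 1).toNat = k := by
  rw [PySem.Chars.endswith_iff]
  constructor
  · rintro ⟨pre, hpre⟩
    subst hpre
    rw [pv_rfind_last pre k hk]
    refine ⟨by positivity, ?_⟩
    rw [show ((pre.length : Int) + 1).toNat = pre.length + 1 by omega]
    simp
  · rintro ⟨h0, hdrop⟩
    set d := PySem.Chars.rfind cs ['.'] with hd
    have hmem := pv_rfind_spec cs h0
    have hdn : (d + 1).toNat = d.toNat + 1 := by omega
    have hds : cs.drop d.toNat = '.' :: k := by
      rw [← hdrop, hdn]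
      exact (List.getElem?_eq_some_iff.mp hmem).2 ▸ List.drop_eq_getElem_cons (List.getElem?_eq_some_iff.mp hmem).1
    exact hds ▸ List.drop_suffix _ _
theorem pv_loop_eq (cs : List Char) (m : List (List Char × String))
    (hm : ∀ p ∈ m, '.' ∉ p.1 ∧ p.1 ≠ []) :
    pvALoop cs m =
      PySem.Dict.getD ⟨m⟩
        (if PySem.Chars.rfind cs ['.'] < 0 then ([] : List Char)
         else PySem.Chars.slice cs (some (PySem.Chars.rfind cs ['.'] + 1)) none) "wav" := by
  set d := PySem.Chars.rfind cs ['.'] with hd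
  set ext := (if d < 0 then ([] : List Char) else PySem.Chars.slice cs (some (d + 1)) none) with hext
  induction m with
  | nil => simp [pvALoop, PySem.Dict.getD, PySem.Dict.get?]
  | cons p rest ih =>
    obtain ⟨k, v⟩ := p
    obtain ⟨hkdot, hkne⟩ := hm ⟨k, v⟩ (by simp)
    have hiff : PySem.Chars.endswith cs ('.' :: k) = true ↔ ext = k := by
      rw [pv_endswith_iff cs k hkdot, hext]
      by_cases h0 : d < 0
      · simp only [if_pos h0]
        constructor
        · rintro ⟨h1, -⟩; omega
        · intro h; exact absurd h.symm hkne
      · have h0 := not_lt.mp h0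
        have hs : PySem.Chars.slice cs (some (d + 1)) none = cs.drop (d + 1).toNat :=
          PySem.List.slice_from cs (by omega)
        rw [if_neg (by omega), hs, ← hd]
        constructor
        · rintro ⟨-, h⟩; exact h
        · intro h; exact ⟨h0, h⟩
    simp only [pvALoop, PySem.Dict.getD, PySem.Dict.get?, List.find?_cons]
    by_cases he : PySem.Chars.endswith cs ('.' :: k) = true
    · have : (k == ext) = true := by simp [(hiff.mp he).symm]
      simp [he, this]
    · have hne : ext ≠ k := fun h => he (hiff.mpr h)
      have : (k == ext) = false := by simp; exact fun h => hne h.symm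
      simp only [he, this]
      have := ih (fun p hp => hm p (List.mem_cons_of_mem _ hp))
      simpa [PySem.Dict.getD, PySem.Dict.get?] using this

-- ===== VERDICT (by name: the statement is the Claim_ definition above) =====
theorem guess_audio_format_spec : Claim_equal_guess_audio_format := by
  intro s _
  unfold Spec_guess_audio_format guess_audio_format guess_audio_format_alt
  exact pv_loop_eq _ pvFormatMap (by decide)
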